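-- pv_equiv track=rewrite | github.com/Shirhussain/Algorithm_by_shir | recursion/deepDive/football_score.py | number_of_ways_memo
-- ===== SOURCE A (Python) =====
-- def number_of_ways_memo(n, memo={}):
--     if n == 0:
--         return 1
--     if n < 0:
--         return 0
--     if n in memo:
--         return memo[n]
--
--     memo[n] = number_of_ways_memo(n-7, memo) + number_of_ways_memo(n-3, memo)
--     return memo[n]
-- ===== SOURCE B (Python) =====
-- def number_of_ways_memo(n, memo={}):
--     # Bottom-up DP table replacing A's top-down memoized recursion.
--     # Consults the caller's memo (as A does) but does not mutate it.
--     if n < 0: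
--         return 0
--     if n == 0:
--         return 1
--     if n in memo:
--         return memo[n]
--     dp = [1]
--     for i in range(1, n + 1):
--         if i in memo:
--             dp.append(memo[i])
--         else:
--             dp.append((dp[i - 3] if i >= 3 else 0) + (dp[i - 7] if i >= 7 else 0))
--     return dp[n]
-- ===== Notes on version B (the rewrite author's own statement) =====
-- stated objective: alternative
-- what changed: Top-down memoized recursion replaced by an explicit bottom-up dp table filled for i = 1..n (reading caller-supplied memo entries, never mutating the memo); A mutates the passed memo in place, B does not (return values agree).
-- outside the precondition, e.g. on number_of_ways_memo(6200, {6193: 0, 6197: 0}): A returns 0, B returns 0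
import Mathlib
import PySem

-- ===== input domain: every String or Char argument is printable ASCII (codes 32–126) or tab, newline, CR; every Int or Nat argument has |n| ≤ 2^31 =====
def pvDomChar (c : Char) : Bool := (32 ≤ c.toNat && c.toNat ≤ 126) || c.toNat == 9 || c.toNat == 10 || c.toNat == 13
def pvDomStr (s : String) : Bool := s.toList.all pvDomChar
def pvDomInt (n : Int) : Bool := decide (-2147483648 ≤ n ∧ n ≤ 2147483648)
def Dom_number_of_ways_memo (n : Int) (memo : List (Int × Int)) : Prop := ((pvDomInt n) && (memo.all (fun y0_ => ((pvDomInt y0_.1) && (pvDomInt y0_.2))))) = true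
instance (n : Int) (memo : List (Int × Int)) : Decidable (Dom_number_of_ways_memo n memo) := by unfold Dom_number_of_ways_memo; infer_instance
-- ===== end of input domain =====

-- B replaces A's top-down memoized recursion by a bottom-up dp table; return values agree (A additionally mutates the caller's memo, B does not).

-- ===== PORT A =====
-- Transliteration of A: the evolving memo dict is threaded as state; the result is (value, memo).
def pvGoA (n : Int) (m : PySem.Dict Int Int) : Int × PySem.Dict Int Int :=
  if n = 0 then (1, m)
  else if n < 0 then (0, m)
  else
    match m.get? n with
    | some v => (v, m)
    | none =>
      let p7 := pvGoA (n - 7) m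
      let p3 := pvGoA (n - 3) p7.2
      let m' := p3.2.insert n (p7.1 + p3.1)
      (m'.getD n 0, m')        -- `return memo[n]` right after `memo[n] = …`
termination_by n.toNat
decreasing_by all_goals omega

def number_of_ways_memo (n : Int) (memo : List (Int × Int)) : Int :=
  (pvGoA n (PySem.Dict.mk memo)).1

-- ===== PORT B =====
-- the dp-filling loop of Source B (dp starts as [1]; one append per i in range(1, n+1))
def pvLoopBdef (d : PySem.Dict Int Int) (n : Int) : List Int :=
  (PySem.List.pyRange 1 (n + 1) 1).foldl
    (fun dp i =>
      match d.get? i with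
      | some v => dp ++ [v]
      | none => dp ++ [(if 3 ≤ i then PySem.List.pyGetD dp (i - 3) 0 else 0) +
                       (if 7 ≤ i then PySem.List.pyGetD dp (i - 7) 0 else 0)]) [1]

def number_of_ways_memo_alt (n : Int) (memo : List (Int × Int)) : Int :=
  if n < 0 then 0
  else if n = 0 then 1
  else
    match (PySem.Dict.mk memo).get? n with
    | some v => v
    | none => PySem.List.pyGetD (pvLoopBdef (PySem.Dict.mk memo) n) n 0

-- ===== PRECONDITION & SPEC =====
-- Pre_ excludes large n whose memo has no entry for n itself: there A's recursion descends
-- roughly n/7 stack frames along the n → n-7 chain and exceeds CPython's recursion limit,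
-- raising RecursionError (observed from n ≈ 7000 with the default limit); when memo already
-- holds n, A answers from the dict without recursing, so those inputs stay inside Pre_.
def Pre_number_of_ways_memo (n : Int) (memo : List (Int × Int)) : Prop :=
  n ≤ 6000 ∨ ∃ p ∈ memo, p.1 = n
instance (n : Int) (memo : List (Int × Int)) : Decidable (Pre_number_of_ways_memo n memo) := by unfold Pre_number_of_ways_memo; infer_instance
def pvWitness_number_of_ways_memo : Int × (List (Int × Int)) := (10, [(3, 2)])
def Spec_number_of_ways_memo (n : Int) (memo : List (Int × Int)) (out : Int) : Prop := out = number_of_ways_memo_alt n memo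
instance (n : Int) (memo : List (Int × Int)) (out : Int) : Decidable (Spec_number_of_ways_memo n memo out) := by unfold Spec_number_of_ways_memo; infer_instance

-- ===== CLAIM (what is proved, stated in full; the proofs are below) =====
def Claim_equal_number_of_ways_memo : Prop := ∀ (n : Int) (memo : List (Int × Int)), Dom_number_of_ways_memo n memo → Pre_number_of_ways_memo n memo → Spec_number_of_ways_memo n memo (number_of_ways_memo n memo)

-- ===== LEMMAS AND PROOFS =====

-- The common mathematical value: what A computes over the INITIAL memo d.
def pvG (d : PySem.Dict Int Int) (n : Int) : Int :=
  if n = 0 then 1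
  else if n < 0 then 0
  else
    match d.get? n with
    | some v => v
    | none => pvG d (n - 7) + pvG d (n - 3)
termination_by n.toNat
decreasing_by all_goals omega

-- Invariant of the evolving memo m relative to the initial memo d.
def pvInv (d m : PySem.Dict Int Int) : Prop :=
  ∀ k v, (d.get? k = some v → m.get? k = some v) ∧
         (0 < k → m.get? k = some v → v = pvG d k)

lemma pvInv_init (d : PySem.Dict Int Int) : pvInv d d := by
  intro k v
  refine ⟨fun h => h, fun hk hv => ?_⟩
  rw [pvG]
  simp [show ¬ k = 0 by omega, show ¬ k < 0 by omega, hv]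

lemma pvG_eq_of_get (d : PySem.Dict Int Int) (k v : Int) (hk : 0 < k)
    (h : d.get? k = some v) : pvG d k = v := by
  rw [pvG]
  simp [show ¬ k = 0 by omega, show ¬ k < 0 by omega, h]

lemma pvG_rec (d : PySem.Dict Int Int) (k : Int) (hk : 0 < k)
    (hd : d.get? k = none) : pvG d k = pvG d (k - 7) + pvG d (k - 3) := by
  rw [pvG]
  simp [show ¬ k = 0 by omega, show ¬ k < 0 by omega, hd]

lemma pvGoA_spec (d : PySem.Dict Int Int) :
    ∀ (N : Nat) (n : Int) (m : PySem.Dict Int Int), n.toNat ≤ N → pvInv d m →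
      (pvGoA n m).1 = pvG d n ∧ pvInv d (pvGoA n m).2 := by
  intro N
  induction N with
  | zero =>
    intro n m hn hinv
    rw [pvGoA, pvG]
    rcases lt_trichotomy n 0 with h | h | h
    · simp [show ¬ n = 0 by omega, h, hinv]
    · simp [h, hinv]
    · omega
  | succ N ih =>
    intro n m hn hinv
    rw [pvGoA, pvG]
    by_cases h0 : n = 0
    · simp [h0, hinv]
    by_cases hneg : n < 0
    · simp [h0, hneg, hinv]
    simp only [h0, hneg, if_false]
    cases hm : m.get? n with
    | some v =>
      have hd : v = pvG d n := (hinv n v).2 (by omega) hm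
      rw [pvG] at hd
      simp only [h0, hneg, if_false] at hd
      simp [hd, hinv]
    | none =>
      have hd : d.get? n = none := by
        cases hdn : d.get? n with
        | none => rfl
        | some w => have := (hinv n w).1 hdn; rw [hm] at this; cases this
      simp only [hd]
      obtain ⟨h7v, h7i⟩ := ih (n - 7) m (by omega) hinv
      obtain ⟨h3v, h3i⟩ := ih (n - 3) (pvGoA (n - 7) m).2 (by omega) h7i
      set m2 := (pvGoA (n - 3) (pvGoA (n - 7) m).2).2 with hm2
      have hval : (pvGoA (n - 7) m).1 + (pvGoA (n - 3) (pvGoA (n - 7) m).2).1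
          = pvG d (n - 7) + pvG d (n - 3) := by rw [h7v, h3v]
      constructor
      · simp only [PySem.Dict.getD_eq_get?_getD, PySem.Dict.get?_insert_self]
        simpa using hval
      · intro k v
        constructor
        · intro hdk
          have hkne : k ≠ n := by intro h; rw [h, hd] at hdk; cases hdk
          rw [PySem.Dict.get?_insert_of_ne _ _ hkne]
          exact (h3i k v).1 hdk
        · intro hk hmk
          by_cases hkn : k = n
          · subst hkn
            rw [PySem.Dict.get?_insert_self] at hmk
            have : v = pvG d (k - 7) + pvG d (k - 3) := by
              injection hmk with h; rw [← h, hval]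
            rw [this, (pvG_rec d k (by omega) hd)]
          · rw [PySem.Dict.get?_insert_of_ne _ _ hkn] at hmk
            exact (h3i k v).2 hk hmk

lemma portA_eq_pvG (n : Int) (memo : List (Int × Int)) :
    number_of_ways_memo n memo = pvG (PySem.Dict.mk memo) n := by
  exact (pvGoA_spec (PySem.Dict.mk memo) n.toNat n (PySem.Dict.mk memo) le_rfl
    (pvInv_init _)).1

-- B's loop in closed form: the dp list is the table of pvG on 0..j.
lemma pvLoopB (d : PySem.Dict Int Int) :
    ∀ (j : Nat), pvLoopBdef d (j : Int)
      = (List.range (j + 1)).map (fun t : Nat => pvG d (t : Int)) := by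
  intro j
  induction j with
  | zero =>
    unfold pvLoopBdef
    simp only [Nat.cast_zero]
    rw [PySem.List.pyRange_one_eq_nil (by omega)]
    have h0 : pvG d 0 = 1 := by rw [pvG]; simp
    simp [List.range_succ, h0]
  | succ j ih =>
    unfold pvLoopBdef at ih ⊢
    have hc : ((j + 1 : Nat) : Int) + 1 = ((j : Int) + 1) + 1 := by push_cast; ring
    have hsplit : PySem.List.pyRange 1 (((j : Int) + 1) + 1) 1
        = PySem.List.pyRange 1 ((j : Int) + 1) 1 ++ [(j : Int) + 1] := by
      exact_mod_cast PySem.List.pyRange_one_succ_right (a := 1) (b := (j : Int) + 1) (by omega)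
    rw [hc, hsplit, List.foldl_append, ih]
    have hlen : ((List.range (j + 1)).map (fun t : Nat => pvG d (t : Int))).length = j + 1 := by
      simp
    have hget : ∀ (t : Nat), t < j + 1 →
        PySem.List.pyGetD ((List.range (j + 1)).map (fun t : Nat => pvG d (t : Int))) (t : Int) 0
          = pvG d (t : Int) := by
      intro t ht
      rw [PySem.List.pyGetD_eq_getElem _ _ (by omega) (by simp only [hlen]; push_cast; omega)]
      simp
    have hrange : List.range (j + 1 + 1) = List.range (j + 1) ++ [j + 1] := by
      simp [List.range_succ]
    rw [hrange, List.map_append]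
    simp only [List.foldl_cons, List.foldl_nil, List.map_cons, List.map_nil]
    cases hdk : d.get? ((j : Int) + 1) with
    | some v =>
      simp only [hdk]
      have : pvG d (((j + 1 : Nat) : Int)) = v := by
        rw [pvG_eq_of_get d _ v (by omega) (by push_cast; exact hdk)]
      rw [this]
    | none =>
      simp only [hdk]
      congr 1
      have hrec : pvG d (((j + 1 : Nat) : Int))
          = pvG d ((j : Int) + 1 - 7) + pvG d ((j : Int) + 1 - 3) := by
        have := pvG_rec d ((j : Int) + 1) (by omega) hdk
        push_cast
        exact this
      rw [hrec]
      by_cases h3 : 3 ≤ (j : Int) + 1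
      · by_cases h7 : 7 ≤ (j : Int) + 1
        · have e3 : ((j : Int) + 1) - 3 = ((j - 2 : Nat) : Int) := by omega
          have e7 : ((j : Int) + 1) - 7 = ((j - 6 : Nat) : Int) := by omega
          rw [if_pos h3, if_pos h7, e3, e7, hget _ (by omega), hget _ (by omega),
            ← e3, ← e7]
          rw [Int.add_comm]
        · have e3 : ((j : Int) + 1) - 3 = ((j - 2 : Nat) : Int) := by omega
          have g7 : pvG d (((j : Int) + 1) - 7) = 0 := by
            rw [pvG]; simp [show ¬ ((j : Int) + 1) - 7 = 0 by omega,
              show ((j : Int) + 1) - 7 < 0 by omega]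
          rw [if_pos h3, if_neg h7, e3, hget _ (by omega), ← e3, g7]
          rw [Int.add_comm]
      · have h7 : ¬ 7 ≤ (j : Int) + 1 := by omega
        have g3 : pvG d (((j : Int) + 1) - 3) = 0 := by
          rw [pvG]; simp [show ¬ ((j : Int) + 1) - 3 = 0 by omega,
            show ((j : Int) + 1) - 3 < 0 by omega]
        have g7 : pvG d (((j : Int) + 1) - 7) = 0 := by
          rw [pvG]; simp [show ¬ ((j : Int) + 1) - 7 = 0 by omega,
            show ((j : Int) + 1) - 7 < 0 by omega]
        rw [if_neg h3, if_neg h7, g3, g7]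

lemma portB_eq_pvG (n : Int) (memo : List (Int × Int)) :
    number_of_ways_memo_alt n memo = pvG (PySem.Dict.mk memo) n := by
  unfold number_of_ways_memo_alt
  by_cases hneg : n < 0
  · rw [if_pos hneg, pvG]
    simp [show ¬ n = 0 by omega, hneg]
  by_cases h0 : n = 0
  · rw [if_neg hneg, if_pos h0, pvG]; simp [h0]
  rw [if_neg hneg, if_neg h0]
  cases hdk : (PySem.Dict.mk memo).get? n with
  | some v => exact (pvG_eq_of_get _ n v (by omega) hdk).symm
  | none =>
    have hn : n = ((n.toNat : Nat) : Int) := by omega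
    rw [hn, pvLoopB (PySem.Dict.mk memo) n.toNat]
    have hlen : ((List.range (n.toNat + 1)).map
        (fun t : Nat => pvG (PySem.Dict.mk memo) (t : Int))).length = n.toNat + 1 := by simp
    rw [PySem.List.pyGetD_eq_getElem _ _ (by omega) (by simp only [hlen]; push_cast; omega)]
    simp

-- ===== VERDICT (by name: the statement is the Claim_ definition above) =====
theorem number_of_ways_memo_spec : Claim_equal_number_of_ways_memo := by
  intro n memo _ _
  unfold Spec_number_of_ways_memo
  rw [portA_eq_pvG, portB_eq_pvG]
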